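-- pv_equiv track=rewrite | github.com/pypi-data/pypi-mirror-392 | packages/ecodev-sankey/ecodev_sankey-0.0.6.tar.gz/ecodev_sankey-0.0.6/ecodev_sankey/methodo/filter_helpers.py | _get_minimal_filter_list
-- ===== SOURCE A (Python) =====
-- from collections import defaultdict
--
-- def _get_minimal_filter_list(filters: list[str]) -> dict[int, list[str]]:
--     """
--     Given a list of filter values at different levels of the hierarchy,
--     * remove specifics filters covered by a parent one
--     * return a dict mapping each hierarchy level to the list of filters kept
--
--     ['A | B', 'A', 'C | D', 'E | F | G']
--     =>
--     {0:['A'],1:['D'], 2:['G']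
--
--     }
--     """
--     reduced_filters = defaultdict(list)
--     normalized = [k.replace(' | ', '|') for k in filters]
--     kept = []
--     for label in sorted(normalized, key=lambda x: x.count('|')):
--         levels = label.split('|')
--         parents = ['|'.join(levels[:i]) for i in range(1, len(levels)+1)]
--         if not any(parent in kept for parent in parents):
--             kept.append(label)
--     for k in kept:
--         reduced_filters[k.count('|')].append(k.split('|')[-1])
--     return reduced_filters
-- ===== SOURCE B (Python) =====
-- from collections import defaultdict
--
-- def _get_minimal_filter_list(filters: list[str]) -> dict[int, list[str]]:
--     """Set-based reformulation: bucket the normalized labels by depth and keep a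
--     label iff no proper '|'-boundary prefix of it occurs anywhere in the whole
--     label set and it is not a duplicate within its depth; no incremental kept
--     list is scanned."""
--     buckets = defaultdict(list)
--     universe = set()
--     for f in filters:
--         lab = f.replace(' | ', '|')
--         buckets[lab.count('|')].append(lab)
--         universe.add(lab)
--     reduced = defaultdict(list)
--     for depth in sorted(buckets):
--         seen = set()
--         for lab in buckets[depth]:
--             if lab in seen:
--                 continue
--             segs = lab.split('|')
--             if any('|'.join(segs[:i]) in universe for i in range(1, len(segs))):
--                 continue
--             seen.add(lab)
--             reduced[depth].append(segs[-1])
--     return reduced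
-- ===== Notes on version B (the rewrite author's own statement) =====
-- stated objective: faster
-- what changed: B drops A's sort-then-scan-the-growing-kept-list greedy entirely: it buckets the normalized labels by depth in one pass, and decides each label against the STATIC set of all labels (kept iff no proper '|'-boundary prefix of it occurs anywhere and it is not a duplicate within its depth, with hash-set lookups), emitting the result dict per ascending depth.
import Mathlib
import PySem

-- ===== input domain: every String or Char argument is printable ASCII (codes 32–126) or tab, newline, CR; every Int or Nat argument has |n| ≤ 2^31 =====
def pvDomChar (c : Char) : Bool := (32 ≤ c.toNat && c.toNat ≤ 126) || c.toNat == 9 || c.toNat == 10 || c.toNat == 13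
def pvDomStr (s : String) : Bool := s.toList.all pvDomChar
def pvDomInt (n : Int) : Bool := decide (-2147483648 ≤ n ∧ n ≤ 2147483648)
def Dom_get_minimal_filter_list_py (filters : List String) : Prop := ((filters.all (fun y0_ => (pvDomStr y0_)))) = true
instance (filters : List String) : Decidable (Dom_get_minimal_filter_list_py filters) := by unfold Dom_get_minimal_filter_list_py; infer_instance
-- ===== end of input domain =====

-- B replaces A's sort + scan of the growing kept list by a different organisation:
-- it buckets the normalized labels by depth in one pass and decides each label
-- against the STATIC set of all labels (proper '|'-boundary prefixes only) plus a
-- per-depth duplicate set; same return value (objective: faster — measured by the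
-- timing run; the per-label scan of the kept list becomes set lookups).

-- ===== PORT A =====
-- k.replace(' | ', '|')
def pvNorm (k : String) : String := PySem.Str.replace k " | " "|"
-- x.count('|') as the Python int sort key
def pvCnt (x : String) : Int := (PySem.Str.count x "|" : Int)
-- s.split('|')  (PySem.Chars.splitOn is exact for the nonempty separator '|')
def pvSplitBar (s : String) : List String := (PySem.Chars.splitOn s.toList ['|']).map String.ofList
-- k.split('|')[-1]; split always returns a nonempty list, so the -1 index never raises (getD unreachable)
def pvLastSeg (k : String) : String := (PySem.List.pyGet? (pvSplitBar k) (-1)).getD ""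
-- reduced_filters[k.count('|')].append(k.split('|')[-1])  on a defaultdict(list)
def pvDictStep (d : PySem.Dict Int (List String)) (k : String) : PySem.Dict Int (List String) :=
  d.modify (pvCnt k) [] (fun l => l ++ [pvLastSeg k])

-- one iteration of A's first loop: parents = ['|'.join(levels[:i]) for i in range(1, len(levels)+1)]
def pvAStep (kept : List String) (label : String) : List String :=
  if ((PySem.List.pyRange 1 (((pvSplitBar label).length : Int) + 1) 1).map
        (fun i => PySem.Str.join "|" (PySem.List.slice (pvSplitBar label) none (some i)))).any
      (fun parent => kept.contains parent)
  then kept else kept ++ [label]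

def get_minimal_filter_list_py (filters : List String) : List (Int × List String) :=
  let normalized := filters.map pvNorm
  let kept := (PySem.List.sorted normalized pvCnt false).foldl pvAStep []
  (kept.foldl pvDictStep PySem.Dict.empty).items

-- ===== PORT B =====
-- first loop: buckets[lab.count('|')].append(lab); universe.add(lab)
def pvBucketStep (st : PySem.Dict Int (List String) × PySem.Set String) (f : String) :
    PySem.Dict Int (List String) × PySem.Set String :=
  let lab := pvNorm f
  (st.1.modify (pvCnt lab) [] (fun l => l ++ [lab]), PySem.Set.add st.2 lab)

-- body of the inner loop over one bucket, state (seen, reduced)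
def pvInnerStep (univ : PySem.Set String) (depth : Int)
    (st : PySem.Set String × PySem.Dict Int (List String)) (lab : String) :
    PySem.Set String × PySem.Dict Int (List String) :=
  if PySem.Set.contains st.1 lab then st
  else
    let segs := pvSplitBar lab
    if ((PySem.List.pyRange 1 ((segs.length : Int)) 1).map
          (fun i => PySem.Str.join "|" (PySem.List.slice segs none (some i)))).any
        (fun p => PySem.Set.contains univ p)
    then st
    else (PySem.Set.add st.1 lab,
          st.2.modify depth [] (fun l => l ++ [(PySem.List.pyGet? segs (-1)).getD ""]))

def get_minimal_filter_list_py_alt (filters : List String) : List (Int × List String) :=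
  let bu := filters.foldl pvBucketStep (PySem.Dict.empty, PySem.Set.empty)
  let reduced := (PySem.List.sorted bu.1.keys (fun x => x) false).foldl
      (fun red depth =>
        ((bu.1.getD depth []).foldl (pvInnerStep bu.2 depth) (PySem.Set.empty, red)).2)
      PySem.Dict.empty
  reduced.items

-- ===== PRECONDITION & SPEC =====
def Spec_get_minimal_filter_list_py (filters : List String) (out : List (Int × List String)) : Prop := out = get_minimal_filter_list_py_alt filters
instance (filters : List String) (out : List (Int × List String)) : Decidable (Spec_get_minimal_filter_list_py filters out) := by unfold Spec_get_minimal_filter_list_py; infer_instance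

-- ===== CLAIM (what is proved, stated in full; the proofs are below) =====
def Claim_equal_get_minimal_filter_list_py : Prop := ∀ (filters : List String), Dom_get_minimal_filter_list_py filters → Spec_get_minimal_filter_list_py filters (get_minimal_filter_list_py filters)

-- ===== LEMMAS AND PROOFS =====

-- a plain structural recursion computing s.split(c) for a single-character separator
def pvSplit (c : Char) : List Char → List (List Char)
  | [] => [[]]
  | a :: t =>
    if a = c then [] :: pvSplit c t
    else
      match pvSplit c t with
      | [] => [[a]]
      | h :: r => (a :: h) :: r

theorem pvSplit_ne_nil (c : Char) (l : List Char) : pvSplit c l ≠ [] := by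
  cases l with
  | nil => simp [pvSplit]
  | cons a t =>
    simp only [pvSplit]
    split
    · simp
    · split <;> simp

theorem pv_go_eq (c : Char) (l : List Char) : ∀ (fuel : Nat) (cur : List Char)
    (acc : List (List Char)), l.length < fuel →
    PySem.Chars.splitOn.go [c] fuel l cur acc =
      acc.reverse ++ ((cur.reverse ++ (pvSplit c l).headI) :: (pvSplit c l).tail) := by
  induction l with
  | nil =>
    intro fuel cur acc h
    cases fuel with
    | zero => omega
    | succ f =>
      rw [PySem.Chars.splitOn.go]
      · simp [pvSplit]
      · omega
  | cons a t ih =>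
    intro fuel cur acc h
    obtain ⟨h0, t0, hs⟩ : ∃ h0 t0, pvSplit c t = h0 :: t0 := by
      cases hs : pvSplit c t with
      | nil => exact absurd hs (pvSplit_ne_nil c t)
      | cons x y => exact ⟨x, y, rfl⟩
    cases fuel with
    | zero => omega
    | succ f =>
      rw [PySem.Chars.splitOn.go]
      by_cases hc : a = c
      · have hpre : [c].isPrefixOf (a :: t) = true := by simp [List.isPrefixOf, hc]
        rw [if_pos hpre]
        have hd : List.drop [c].length (a :: t) = t := by simp
        rw [hd, ih f [] (cur.reverse :: acc) (by simp at h; omega)]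
        simp [pvSplit, hc, hs]
      · have hpre : [c].isPrefixOf (a :: t) = false := by simp [List.isPrefixOf, Ne.symm hc]
        rw [if_neg (by simp [hpre])]
        rw [ih f (a :: cur) acc (by simp at h; omega)]
        simp [pvSplit, hc, hs]

theorem pv_splitOn_eq (c : Char) (l : List Char) :
    PySem.Chars.splitOn l [c] = pvSplit c l := by
  have h := pv_go_eq c l (l.length + 1) [] [] (by omega)
  cases hs : pvSplit c l with
  | nil => exact absurd hs (pvSplit_ne_nil c l)
  | cons h0 t0 =>
    simp [PySem.Chars.splitOn, hs] at h ⊢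
    simpa using h

theorem pv_intercalate_singleton (sep x : List Char) : List.intercalate sep [x] = x := by
  simp [List.intercalate]

theorem pv_intercalate_cons_cons (sep x y : List Char) (l : List (List Char)) :
    List.intercalate sep (x :: y :: l) = x ++ sep ++ List.intercalate sep (y :: l) := by
  simp [List.intercalate, List.flatten, List.append_assoc]

theorem pv_intercalate_cons_head (sep h : List Char) (a : Char) (r : List (List Char)) :
    List.intercalate sep ((a :: h) :: r) = a :: List.intercalate sep (h :: r) := by
  cases r with
  | nil => simp [pv_intercalate_singleton]
  | cons y l => simp [pv_intercalate_cons_cons]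

-- the joined prefixes of a label are exactly the label itself and its '|'-boundary prefixes
theorem pv_parents_char (c : Char) (l : List Char) : ∀ p : List Char,
    (∃ m : ℕ, m < (pvSplit c l).length ∧ p = [c].intercalate ((pvSplit c l).take (m + 1)))
      ↔ (p = l ∨ p ++ [c] <+: l) := by
  induction l with
  | nil =>
    intro p
    constructor
    · rintro ⟨m, hm, rfl⟩
      simp [pvSplit] at hm
      subst hm
      simp [pvSplit, pv_intercalate_singleton]
    · rintro (rfl | hpre)
      · exact ⟨0, by simp [pvSplit, pv_intercalate_singleton]⟩
      · simp at hpre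
  | cons a t ih =>
    intro p
    obtain ⟨h0, t0, hs⟩ : ∃ h0 t0, pvSplit c t = h0 :: t0 := by
      cases hs : pvSplit c t with
      | nil => exact absurd hs (pvSplit_ne_nil c t)
      | cons x y => exact ⟨x, y, rfl⟩
    by_cases hc : a = c
    · subst hc
      have hsplit : pvSplit a (a :: t) = [] :: pvSplit a t := by simp [pvSplit]
      constructor
      · rintro ⟨m, hm, rfl⟩
        rw [hsplit] at hm ⊢
        cases m with
        | zero =>
          right
          simp [pv_intercalate_singleton, List.cons_prefix_cons]
        | succ k =>
          have htk : (pvSplit a t).take (k + 1) = h0 :: t0.take k := by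
            rw [hs, List.take_succ_cons]
          rw [List.take_succ_cons, htk, pv_intercalate_cons_cons, ← htk]
          have hmem := (ih ([a].intercalate ((pvSplit a t).take (k + 1)))).mp
            ⟨k, by simp at hm; omega, rfl⟩
          rcases hmem with heq | hpre
          · left; simp [heq]
          · right; simpa [List.cons_prefix_cons] using hpre
      · rintro (rfl | hpre)
        · obtain ⟨k, hk, ht⟩ := (ih t).mpr (Or.inl rfl)
          refine ⟨k + 1, by rw [hsplit, List.length_cons]; omega, ?_⟩
          have htk : (pvSplit a t).take (k + 1) = h0 :: t0.take k := by
            rw [hs, List.take_succ_cons]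
          rw [hsplit, List.take_succ_cons, htk, pv_intercalate_cons_cons, ← htk]
          simp [← ht]
        · cases p with
          | nil =>
            refine ⟨0, by rw [hsplit]; simp, ?_⟩
            rw [hsplit]
            simp [pv_intercalate_singleton]
          | cons b q =>
            rw [List.cons_append, List.cons_prefix_cons] at hpre
            obtain ⟨rfl, hq⟩ := hpre
            obtain ⟨k, hk, ht⟩ := (ih q).mpr (Or.inr hq)
            refine ⟨k + 1, by rw [hsplit, List.length_cons]; omega, ?_⟩
            have htk : (pvSplit b t).take (k + 1) = h0 :: t0.take k := by
              rw [hs, List.take_succ_cons]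
            rw [hsplit, List.take_succ_cons, htk, pv_intercalate_cons_cons, ← htk]
            simp [← ht]
    · have hsplit : pvSplit c (a :: t) = (a :: h0) :: t0 := by
        simp [pvSplit, hc, hs]
      have hlen : ((a :: h0) :: t0).length = (pvSplit c t).length := by
        rw [hs]; simp
      constructor
      · rintro ⟨m, hm, rfl⟩
        rw [hsplit] at hm ⊢
        have htk : (pvSplit c t).take (m + 1) = h0 :: t0.take m := by
          rw [hs, List.take_succ_cons]
        rw [List.take_succ_cons, pv_intercalate_cons_head, ← htk]
        have hmem := (ih ([c].intercalate ((pvSplit c t).take (m + 1)))).mp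
          ⟨m, by omega, rfl⟩
        rcases hmem with heq | hpre
        · left; simp [heq]
        · right
          rw [List.cons_append, List.cons_prefix_cons]
          exact ⟨rfl, hpre⟩
      · rintro (rfl | hpre)
        · obtain ⟨k, hk, ht⟩ := (ih t).mpr (Or.inl rfl)
          refine ⟨k, by rw [hsplit]; omega, ?_⟩
          have htk : (pvSplit c t).take (k + 1) = h0 :: t0.take k := by
            rw [hs, List.take_succ_cons]
          rw [hsplit, List.take_succ_cons, pv_intercalate_cons_head, ← htk, ← ht]
        · cases p with
          | nil =>
            exfalso
            rw [List.nil_append, List.cons_prefix_cons] at hpre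
            exact hc hpre.1.symm
          | cons b q =>
            rw [List.cons_append, List.cons_prefix_cons] at hpre
            obtain ⟨rfl, hq⟩ := hpre
            obtain ⟨k, hk, ht⟩ := (ih q).mpr (Or.inr hq)
            refine ⟨k, by rw [hsplit]; omega, ?_⟩
            have htk : (pvSplit c t).take (k + 1) = h0 :: t0.take k := by
              rw [hs, List.take_succ_cons]
            rw [hsplit, List.take_succ_cons, pv_intercalate_cons_head, ← htk, ← ht]

theorem pv_splitBar_eq (label : String) :
    pvSplitBar label = (pvSplit '|' label.toList).map String.ofList := by
  simp [pvSplitBar, pv_splitOn_eq]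

theorem pv_len_eq (label : String) :
    (pvSplitBar label).length = (pvSplit '|' label.toList).length := by
  rw [pv_splitBar_eq, List.length_map]

theorem pv_join_take (label : String) (n : Nat) :
    (PySem.Str.join "|" ((pvSplitBar label).take n)).toList
      = List.intercalate ['|'] ((pvSplit '|' label.toList).take n) := by
  have hbar : ("|" : String).toList = ['|'] := rfl
  rw [PySem.Str.toList_join, pv_splitBar_eq, ← List.map_take, List.map_map, hbar]
  simp [PySem.Chars.join, Function.comp_def]

theorem pv_mem_parents (label p : String) :
    (p ∈ (PySem.List.pyRange 1 (((pvSplitBar label).length : Int) + 1) 1).map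
        (fun i => PySem.Str.join "|" (PySem.List.slice (pvSplitBar label) none (some i))))
      ↔ (p = label ∨ p.toList ++ ['|'] <+: label.toList) := by
  rw [List.mem_map]
  have hl := pv_len_eq label
  constructor
  · rintro ⟨i, hi, rfl⟩
    rw [PySem.List.mem_pyRange_one] at hi
    obtain ⟨h1, h2⟩ := hi
    rw [PySem.List.slice_to _ (by omega)]
    obtain ⟨m, hm1, hm2⟩ : ∃ m : Nat, i.toNat = m + 1 ∧ m < (pvSplit '|' label.toList).length :=
      ⟨i.toNat - 1, by omega, by omega⟩
    have hchar := (pv_parents_char '|' label.toList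
        (PySem.Str.join "|" ((pvSplitBar label).take i.toNat)).toList).mp
      ⟨m, hm2, by rw [pv_join_take, hm1]⟩
    rcases hchar with heq | hpre
    · left; exact String.ext_iff.mpr heq
    · right; exact hpre
  · intro h
    have h' : (p.toList = label.toList ∨ p.toList ++ ['|'] <+: label.toList) := by
      rcases h with rfl | hp
      · exact Or.inl rfl
      · exact Or.inr hp
    obtain ⟨m, hm, hp⟩ := (pv_parents_char '|' label.toList p.toList).mpr h'
    refine ⟨(m : Int) + 1, ?_, ?_⟩
    · rw [PySem.List.mem_pyRange_one]
      omega
    · rw [PySem.List.slice_to _ (by omega)]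
      have hnn : ((m : Int) + 1).toNat = m + 1 := by omega
      rw [hnn]
      exact (String.ext_iff.mpr (by rw [pv_join_take]; exact hp)).symm

-- split then join with the same separator is the identity
theorem pv_join_split (l : List Char) : List.intercalate ['|'] (pvSplit '|' l) = l := by
  induction l with
  | nil => simp [pvSplit, pv_intercalate_singleton]
  | cons a t ih =>
    obtain ⟨h0, t0, hs⟩ : ∃ h0 t0, pvSplit '|' t = h0 :: t0 := by
      cases hs : pvSplit '|' t with
      | nil => exact absurd hs (pvSplit_ne_nil '|' t)
      | cons x y => exact ⟨x, y, rfl⟩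
    by_cases hc : a = '|'
    · subst hc
      have : pvSplit '|' ('|' :: t) = [] :: pvSplit '|' t := by simp [pvSplit]
      rw [this, hs, pv_intercalate_cons_cons, ← hs, ih]
      simp
    · have : pvSplit '|' (a :: t) = (a :: h0) :: t0 := by simp [pvSplit, hc, hs]
      rw [this, pv_intercalate_cons_head, ← hs, ih]

-- a strict prefix of the pieces joins to a proper boundary prefix
theorem pv_intercalate_take_prefix (sep : List Char) : ∀ (n : Nat) (xs : List (List Char)),
    n + 1 < xs.length →
    List.intercalate sep (xs.take (n + 1)) ++ sep <+: List.intercalate sep xs := by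
  intro n
  induction n with
  | zero =>
    intro xs h
    match xs, h with
    | x :: y :: r, _ =>
      rw [List.take_succ_cons, List.take_zero, pv_intercalate_singleton,
        pv_intercalate_cons_cons]
      exact ⟨List.intercalate sep (y :: r), by simp⟩
  | succ k ih =>
    intro xs h
    match xs, h with
    | x :: xs', h =>
      have h' : k + 1 < xs'.length := by simp at h; omega
      obtain ⟨z, zs, hzs⟩ : ∃ z zs, xs' = z :: zs := by
        cases xs' with
        | nil => simp at h'
        | cons z zs => exact ⟨z, zs, rfl⟩
      have hys : xs'.take (k + 1) = z :: zs.take k := by rw [hzs, List.take_succ_cons]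
      have ihx := ih xs' h'
      rw [List.take_succ_cons, hys, pv_intercalate_cons_cons, ← hys, hzs,
        pv_intercalate_cons_cons, ← hzs]
      obtain ⟨r, hr⟩ := ihx
      refine ⟨r, ?_⟩
      simp only [List.append_assoc] at hr ⊢
      rw [hr]

-- the proper joined prefixes (range stops before len(segs)) are exactly the boundary prefixes
theorem pv_mem_proper_parents (label p : String) :
    (p ∈ (PySem.List.pyRange 1 (((pvSplitBar label).length : Int)) 1).map
        (fun i => PySem.Str.join "|" (PySem.List.slice (pvSplitBar label) none (some i))))
      ↔ p.toList ++ ['|'] <+: label.toList := by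
  rw [List.mem_map]
  have hl := pv_len_eq label
  constructor
  · rintro ⟨i, hi, rfl⟩
    rw [PySem.List.mem_pyRange_one] at hi
    obtain ⟨h1, h2⟩ := hi
    rw [PySem.List.slice_to _ (by omega)]
    obtain ⟨m, hm1, hm2⟩ : ∃ m : Nat, i.toNat = m + 1 ∧ m + 1 < (pvSplit '|' label.toList).length :=
      ⟨i.toNat - 1, by omega, by omega⟩
    have := pv_intercalate_take_prefix ['|'] m (pvSplit '|' label.toList) hm2
    rw [pv_join_split] at this
    rw [pv_join_take, hm1]
    exact this
  · intro hpre
    obtain ⟨m, hm, hp⟩ := (pv_parents_char '|' label.toList p.toList).mpr (Or.inr hpre)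
    have hmlt : m + 1 < (pvSplit '|' label.toList).length := by
      rcases Nat.lt_or_ge (m + 1) (pvSplit '|' label.toList).length with h | h
      · exact h
      · exfalso
        have : m + 1 = (pvSplit '|' label.toList).length := by omega
        rw [this, List.take_length, pv_join_split] at hp
        have := hpre.length_le
        simp [hp] at this
    refine ⟨(m : Int) + 1, ?_, ?_⟩
    · rw [PySem.List.mem_pyRange_one]; omega
    · rw [PySem.List.slice_to _ (by omega)]
      have hnn : ((m : Int) + 1).toNat = m + 1 := by omega
      rw [hnn]
      exact (String.ext_iff.mpr (by rw [pv_join_take]; exact hp)).symm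

-- coverage as a proposition: y covers x (equal, or a '|'-boundary ancestor)
def pvCov (y x : String) : Prop := y = x ∨ y.toList ++ ['|'] <+: x.toList

theorem pv_cov_trans {z y x : String} (h1 : pvCov z y) (h2 : pvCov y x) : pvCov z x := by
  rcases h1 with rfl | h1
  · exact h2
  · rcases h2 with rfl | h2
    · exact Or.inr h1
    · right
      exact h1.trans ((List.prefix_append y.toList ['|']).trans h2)

-- A's any-parents test over kept, as a proposition
theorem pv_atest_iff (kept : List String) (label : String) :
    (((PySem.List.pyRange 1 (((pvSplitBar label).length : Int) + 1) 1).map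
        (fun i => PySem.Str.join "|" (PySem.List.slice (pvSplitBar label) none (some i)))).any
      (fun parent => kept.contains parent) = true)
      ↔ ∃ k ∈ kept, pvCov k label := by
  simp only [List.any_eq_true, List.contains_iff_mem]
  constructor
  · rintro ⟨p, hp, hmem⟩
    exact ⟨p, hmem, (pv_mem_parents label p).mp hp⟩
  · rintro ⟨k, hk, hcov⟩
    exact ⟨k, (pv_mem_parents label k).mpr hcov, hk⟩

-- B's proper-prefix test against the universe, as a proposition
theorem pv_btest_iff (U : PySem.Set String) (label : String) :
    (((PySem.List.pyRange 1 (((pvSplitBar label).length : Int)) 1).map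
        (fun i => PySem.Str.join "|" (PySem.List.slice (pvSplitBar label) none (some i)))).any
      (fun p => PySem.Set.contains U p) = true)
      ↔ ∃ y ∈ U, y.toList ++ ['|'] <+: label.toList := by
  simp only [List.any_eq_true, PySem.Set.contains_iff]
  constructor
  · rintro ⟨p, hp, hmem⟩
    exact ⟨p, hmem, (pv_mem_proper_parents label p).mp hp⟩
  · rintro ⟨y, hy, hpre⟩
    exact ⟨y, (pv_mem_proper_parents label y).mpr hpre, hy⟩

-- '|'-count bridge and monotonicity under boundary prefixes
theorem pv_count_go_eq (l : List Char) : ∀ (fuel acc : Nat), l.length ≤ fuel →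
    PySem.Chars.count.go ['|'] fuel l acc = acc + l.count '|' := by
  induction l with
  | nil =>
    intro fuel acc h
    cases fuel <;> simp [PySem.Chars.count.go]
  | cons a t ih =>
    intro fuel acc h
    cases fuel with
    | zero => simp at h
    | succ f =>
      rw [PySem.Chars.count.go]
      by_cases hc : a = '|'
      · have hpre : ['|'].isPrefixOf (a :: t) = true := by simp [List.isPrefixOf, hc]
        rw [if_pos hpre]
        have hd : List.drop ['|'].length (a :: t) = t := by simp
        rw [hd, ih f (acc + 1) (by simp at h; omega)]
        simp [hc]
        omega
      · have hpre : ['|'].isPrefixOf (a :: t) = false := by simp [List.isPrefixOf, Ne.symm hc]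
        rw [if_neg (by simp [hpre])]
        rw [ih f acc (by simp at h; omega)]
        simp [hc]

theorem pv_cnt_eq (s : String) : pvCnt s = (s.toList.count '|' : Int) := by
  unfold pvCnt
  have h : PySem.Str.count s "|" = s.toList.count '|' := by
    rw [PySem.Str.count_eq]
    show PySem.Chars.count s.toList ['|'] = _
    unfold PySem.Chars.count
    rw [if_neg (by simp), pv_count_go_eq s.toList s.toList.length 0 (le_refl _)]
    simp
  rw [h]

theorem pv_cnt_lt_of_boundary_prefix {y x : String} (h : y.toList ++ ['|'] <+: x.toList) :
    pvCnt y < pvCnt x := by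
  rw [pv_cnt_eq, pv_cnt_eq]
  have hle := List.Sublist.count_le (l₂ := x.toList) (a := '|') h.sublist
  rw [List.count_append] at hle
  simp at hle
  omega

-- ---- insertBy / stable sort as depth buckets ----

theorem pv_insertBy_cons (before : String → String → Bool) (x a : String) (t : List String) :
    PySem.List.insertBy before x (a :: t)
      = if before x a then x :: a :: t else a :: PySem.List.insertBy before x t := by
  rfl

theorem pv_insertBy_append_left (before : String → String → Bool) (x : String)
    (F R : List String) (h : ∀ a ∈ F, before x a = false) :
    PySem.List.insertBy before x (F ++ R) = F ++ PySem.List.insertBy before x R := by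
  induction F with
  | nil => simp
  | cons a t ih =>
    rw [List.cons_append, pv_insertBy_cons, if_neg (by simp [h a (by simp)]),
      ih (fun a ha => h a (by simp [ha]))]
    simp

theorem pv_sorted_min_split (key : String → Int) (d0 : Int) :
    ∀ (xs : List String), (∀ x ∈ xs, d0 ≤ key x) →
    PySem.List.sorted xs key false
      = xs.filter (fun x => key x == d0)
          ++ PySem.List.sorted (xs.filter (fun x => !(key x == d0))) key false := by
  intro xs
  induction xs using List.reverseRecOn with
  | nil => simp [PySem.List.sorted]
  | append_singleton xs x ih =>
    intro hmin
    have hmin' : ∀ y ∈ xs, d0 ≤ key y := fun y hy => hmin y (by simp [hy])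
    have hsx : ∀ (l : List String), PySem.List.sorted (l ++ [x]) key false
        = PySem.List.insertBy (fun a b => decide (key a < key b)) x
            (PySem.List.sorted l key false) := by
      intro l
      rw [PySem.List.sorted_eq_foldl_insertBy, PySem.List.sorted_eq_foldl_insertBy,
        List.foldl_append]
      simp
    have hFkey : ∀ a ∈ xs.filter (fun x => key x == d0), key a = d0 := by
      intro a ha
      have := List.of_mem_filter ha
      simpa using this
    by_cases hx : key x = d0
    · rw [hsx, ih hmin', pv_insertBy_append_left _ _ _ _
        (fun a ha => by simp [hFkey a ha, hx])]
      have hRgt : ∀ b ∈ PySem.List.sorted (xs.filter (fun x => !(key x == d0))) key false,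
          d0 < key b := by
        intro b hb
        rw [PySem.List.mem_sorted] at hb
        have h1 := List.of_mem_filter hb
        have h2 := hmin' b (List.mem_of_mem_filter hb)
        simp at h1
        omega
      have hins : PySem.List.insertBy (fun a b => decide (key a < key b)) x
          (PySem.List.sorted (xs.filter (fun x => !(key x == d0))) key false)
          = x :: PySem.List.sorted (xs.filter (fun x => !(key x == d0))) key false := by
        cases hR : PySem.List.sorted (xs.filter (fun x => !(key x == d0))) key false with
        | nil => rfl
        | cons b R' =>
          rw [pv_insertBy_cons, if_pos]
          simp [hx]
          exact hRgt b (by rw [hR]; simp)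
      rw [hins]
      rw [List.filter_append, List.filter_append]
      simp [hx]
    · have hd0x : d0 < key x := lt_of_le_of_ne (hmin x (by simp)) (Ne.symm hx)
      rw [hsx, ih hmin', pv_insertBy_append_left _ _ _ _
        (fun a ha => by simp [hFkey a ha]; omega), ← hsx]
      rw [List.filter_append, List.filter_append]
      simp [hx]

theorem pv_stable_sort_buckets (key : String → Int) :
    ∀ (n : Nat) (xs : List String), xs.length ≤ n →
    PySem.List.sorted xs key false
      = (PySem.List.sorted (PySem.Set.ofList (xs.map key)) (fun x => x) false).flatMap
          (fun d => xs.filter (fun x => key x == d)) := by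
  intro n
  induction n with
  | zero =>
    intro xs h
    have : xs = [] := by cases xs <;> simp_all
    subst this
    simp [PySem.List.sorted, PySem.Set.ofList_nil]
  | succ n ih =>
    intro xs hlen
    cases hxs : xs with
    | nil => simp [PySem.List.sorted, PySem.Set.ofList_nil]
    | cons x0 xs0 =>
      rw [← hxs]
      have hne : xs ≠ [] := by rw [hxs]; simp
      obtain ⟨d0, rest, hds⟩ : ∃ d0 rest,
          PySem.List.sorted (PySem.Set.ofList (xs.map key)) (fun x => x) false = d0 :: rest := by
        cases hd : PySem.List.sorted (PySem.Set.ofList (xs.map key)) (fun x => x) false with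
        | nil =>
          rw [PySem.List.sorted_eq_nil_iff] at hd
          exfalso
          have : key x0 ∈ PySem.Set.ofList (xs.map key) := by
            rw [PySem.Set.mem_ofList]
            exact List.mem_map_of_mem (by rw [hxs]; simp)
          rw [hd] at this
          simp at this
        | cons a b => exact ⟨a, b, rfl⟩
      have hmin : ∀ x ∈ xs, d0 ≤ key x := by
        intro x hx
        exact PySem.List.key_head_sorted_le _ _ hds (key x)
          ((PySem.Set.mem_ofList _ _).mpr (List.mem_map_of_mem hx))
      have hpw : (d0 :: rest).Pairwise (· < ·) := by
        rw [← hds]; exact PySem.List.sorted_ofList_pairwise_lt _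
      have hd0rest : ∀ d ∈ rest, d0 < d := by
        intro d hd; exact (List.pairwise_cons.mp hpw).1 d hd
      have hrest_pw : rest.Pairwise (· < ·) := (List.pairwise_cons.mp hpw).2
      -- the smaller instance
      have hd0mem : ∃ x ∈ xs, key x = d0 := by
        have : d0 ∈ PySem.Set.ofList (xs.map key) := by
          rw [← PySem.List.mem_sorted (rev := false) (key := fun x => x), hds]; simp
        rw [PySem.Set.mem_ofList] at this
        obtain ⟨x, hx, hk⟩ := List.mem_map.mp this
        exact ⟨x, hx, hk⟩
      have hlt : (xs.filter (fun x => !(key x == d0))).length < xs.length := by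
        rw [List.length_filter_lt_length_iff_exists]
        obtain ⟨x, hx, hk⟩ := hd0mem
        exact ⟨x, hx, by simp [hk]⟩
      have hlen' : (xs.filter (fun x => !(key x == d0))).length ≤ n := by
        have := hlt
        omega
      have hih := ih (xs.filter (fun x => !(key x == d0))) hlen'
      -- sorted key set of the filtered list is rest
      have hrest_nodup : rest.Nodup := hrest_pw.imp (fun h => ne_of_lt h)
      have hds_nodup : (d0 :: rest).Nodup := hpw.imp (fun h => ne_of_lt h)
      have hkeyset : PySem.List.sorted
          (PySem.Set.ofList ((xs.filter (fun x => !(key x == d0))).map key)) (fun x => x) false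
          = rest := by
        apply PySem.List.sorted_eq_of_perm_of_pairwise_lt _ _ _ _ hrest_pw
        rw [List.perm_ext_iff_of_nodup hrest_nodup (PySem.Set.nodup_ofList _)]
        intro a
        rw [PySem.Set.mem_ofList]
        constructor
        · intro ha
          have had0 : a ≠ d0 := fun h => by
            subst h
            exact absurd ha (List.nodup_cons.mp hds_nodup).1
          have : a ∈ PySem.Set.ofList (xs.map key) := by
            rw [← PySem.List.mem_sorted (rev := false) (key := fun x => x), hds]
            simp [ha]
          rw [PySem.Set.mem_ofList] at this
          obtain ⟨x, hx, hk⟩ := List.mem_map.mp this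
          exact List.mem_map.mpr ⟨x, List.mem_filter.mpr ⟨hx, by simp [hk, had0]⟩, hk⟩
        · intro ha
          obtain ⟨x, hx, hk⟩ := List.mem_map.mp ha
          have hxmem := List.mem_of_mem_filter hx
          have hxne : key x ≠ d0 := by
            have := List.of_mem_filter hx
            simpa using this
          have : a ∈ PySem.Set.ofList (xs.map key) := by
            rw [PySem.Set.mem_ofList]
            exact List.mem_map.mpr ⟨x, hxmem, hk⟩
          rw [← PySem.List.mem_sorted (rev := false) (key := fun x => x), hds] at this
          rcases List.mem_cons.mp this with h | h
          · exact absurd (h ▸ hk) hxne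
          · exact h
      have hbuckets : ∀ d ∈ rest,
          (xs.filter (fun x => !(key x == d0))).filter (fun x => key x == d)
            = xs.filter (fun x => key x == d) := by
        intro d hd
        rw [List.filter_filter]
        apply List.filter_congr
        intro x hx
        by_cases h : key x = d
        · simp [h, ne_of_gt (hd0rest d hd)]
        · simp [h]
      rw [pv_sorted_min_split key d0 xs hmin, hih, hkeyset, hds, List.flatMap_cons]
      congr 1
      exact List.flatMap_congr hbuckets

-- ---- the main loop correspondence ----

-- A's step rewritten through the coverage proposition
theorem pv_astep_covered (kept : List String) (label : String)
    (h : ∃ k ∈ kept, pvCov k label) : pvAStep kept label = kept := by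
  unfold pvAStep
  rw [if_pos ((pv_atest_iff kept label).mpr h)]

theorem pv_astep_free (kept : List String) (label : String)
    (h : ¬ ∃ k ∈ kept, pvCov k label) : pvAStep kept label = kept ++ [label] := by
  unfold pvAStep
  rw [if_neg (fun hc => h ((pv_atest_iff kept label).mp hc))]

-- after A's fold, every processed label is covered by some kept label
theorem pv_afold_covers (L : List String) : ∀ (kept : List String) (z : String),
    (z ∈ L ∨ ∃ p ∈ kept, pvCov p z) →
    ∃ p ∈ L.foldl pvAStep kept, pvCov p z := by
  induction L with
  | nil =>
    intro kept z h
    rcases h with h | h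
    · simp at h
    · simpa using h
  | cons a t ih =>
    intro kept z h
    rw [List.foldl_cons]
    by_cases hc : ∃ k ∈ kept, pvCov k a
    · rw [pv_astep_covered kept a hc]
      rcases h with h | h
      · rcases List.mem_cons.mp h with h1 | h1
        · obtain ⟨k, hk, hc'⟩ := hc
          exact ih kept z (Or.inr ⟨k, hk, by rw [h1]; exact hc'⟩)
        · exact ih kept z (Or.inl h1)
      · exact ih kept z (Or.inr h)
    · rw [pv_astep_free kept a hc]
      rcases h with h | h
      · rcases List.mem_cons.mp h with h1 | h1
        · exact ih (kept ++ [a]) z (Or.inr ⟨a, by simp, Or.inl h1.symm⟩)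
        · exact ih (kept ++ [a]) z (Or.inl h1)
      · obtain ⟨p, hp, hpc⟩ := h
        exact ih (kept ++ [a]) z (Or.inr ⟨p, by simp [hp], hpc⟩)

-- the per-bucket (inner) correspondence
theorem pv_inner_loop (N : List String) (d : Int) :
    ∀ (L : List String) (keptPrev cur : List String) (red : PySem.Dict Int (List String)),
    (∀ lab ∈ L, pvCnt lab = d) →
    (∀ k ∈ cur, pvCnt k = d) →
    (∀ k ∈ keptPrev, k ∈ N) →
    (∀ k ∈ keptPrev, pvCnt k < d) →
    (∀ y ∈ N, pvCnt y < d → ∃ p ∈ keptPrev, pvCov p y) →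
    red = (keptPrev ++ cur).foldl pvDictStep PySem.Dict.empty →
    ∃ cur', L.foldl pvAStep (keptPrev ++ cur) = keptPrev ++ cur'
      ∧ L.foldl (pvInnerStep (PySem.Set.ofList N) d) (cur, red)
          = (cur', (keptPrev ++ cur').foldl pvDictStep PySem.Dict.empty)
      ∧ (∀ k ∈ cur', pvCnt k = d)
      ∧ (∀ k ∈ cur', k ∈ cur ∨ k ∈ L) := by
  intro L
  induction L with
  | nil =>
    intro keptPrev cur red _ hcur _ _ _ hred
    exact ⟨cur, by simp, by simp [hred], hcur, fun k hk => Or.inl hk⟩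
  | cons lab L ih =>
    intro keptPrev cur red hL hcur hN hlt hcov hred
    have hlabd : pvCnt lab = d := hL lab (by simp)
    by_cases hcase : ∃ k ∈ keptPrev ++ cur, pvCov k lab
    · -- A skips the label; so does B
      have hA1 : pvAStep (keptPrev ++ cur) lab = keptPrev ++ cur := pv_astep_covered _ _ hcase
      have hBskip : pvInnerStep (PySem.Set.ofList N) d (cur, red) lab = (cur, red) := by
        obtain ⟨k, hk, hkc⟩ := hcase
        rcases List.mem_append.mp hk with hkP | hkC
        · have hprop : k.toList ++ ['|'] <+: lab.toList := by
            rcases hkc with rfl | h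
            · exfalso; have := hlt k hkP; omega
            · exact h
          unfold pvInnerStep
          by_cases hseen : PySem.Set.contains cur lab = true
          · rw [if_pos hseen]
          · rw [if_neg hseen, if_pos ((pv_btest_iff _ lab).mpr
              ⟨k, (PySem.Set.mem_ofList _ _).mpr (hN k hkP), hprop⟩)]
        · have hkl : k = lab := by
            rcases hkc with rfl | h
            · rfl
            · exfalso
              have h1 := pv_cnt_lt_of_boundary_prefix h
              have h2 := hcur k hkC
              omega
          unfold pvInnerStep
          rw [if_pos (show PySem.Set.contains cur lab = true by simpa using hkl ▸ hkC)]
      rw [List.foldl_cons, List.foldl_cons, hA1, hBskip]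
      obtain ⟨cur', h1, h2, h3, h4⟩ :=
        ih keptPrev cur red (fun l h => hL l (by simp [h])) hcur hN hlt hcov hred
      refine ⟨cur', h1, h2, h3, fun k hk => ?_⟩
      rcases h4 k hk with h | h
      · exact Or.inl h
      · exact Or.inr (by simp [h])
    · -- A keeps the label; so does B
      have hA1 : pvAStep (keptPrev ++ cur) lab = keptPrev ++ (cur ++ [lab]) := by
        rw [pv_astep_free _ _ hcase, List.append_assoc]
      have hlabcur : lab ∉ cur := fun h =>
        hcase ⟨lab, List.mem_append_right _ h, Or.inl rfl⟩
      have hBkeep : pvInnerStep (PySem.Set.ofList N) d (cur, red) lab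
          = (cur ++ [lab], red.modify d [] (fun l => l ++ [pvLastSeg lab])) := by
        have hnopre : ¬ (((PySem.List.pyRange 1 (((pvSplitBar lab).length : Int)) 1).map
              (fun i => PySem.Str.join "|" (PySem.List.slice (pvSplitBar lab) none (some i)))).any
            (fun p => PySem.Set.contains (PySem.Set.ofList N) p) = true) := by
          intro h
          obtain ⟨y, hyN, hypre⟩ := (pv_btest_iff _ lab).mp h
          rw [PySem.Set.mem_ofList] at hyN
          have hylt : pvCnt y < d := hlabd ▸ pv_cnt_lt_of_boundary_prefix hypre
          obtain ⟨p, hp, hpc⟩ := hcov y hyN hylt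
          exact hcase ⟨p, List.mem_append_left _ hp, pv_cov_trans hpc (Or.inr hypre)⟩
        unfold pvInnerStep
        rw [if_neg (fun h => hlabcur (by simpa using h))]
        rw [if_neg hnopre, PySem.Set.add_of_not_mem hlabcur]
        rfl
      rw [List.foldl_cons, List.foldl_cons, hA1, hBkeep]
      have hred' : red.modify d [] (fun l => l ++ [pvLastSeg lab])
          = (keptPrev ++ (cur ++ [lab])).foldl pvDictStep PySem.Dict.empty := by
        rw [← List.append_assoc, List.foldl_append]
        simp only [List.foldl_cons, List.foldl_nil]
        rw [← hred]
        unfold pvDictStep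
        rw [hlabd]
      obtain ⟨cur', h1, h2, h3, h4⟩ := ih keptPrev (cur ++ [lab])
        (red.modify d [] (fun l => l ++ [pvLastSeg lab]))
        (fun l h => hL l (by simp [h]))
        (fun k hk => by
          rcases List.mem_append.mp hk with h | h
          · exact hcur k h
          · simp at h; rw [h]; exact hlabd)
        hN hlt hcov hred'
      refine ⟨cur', h1, h2, h3, fun k hk => ?_⟩
      rcases h4 k hk with h | h
      · rcases List.mem_append.mp h with h | h
        · exact Or.inl h
        · simp at h; rw [h]; exact Or.inr (by simp)
      · exact Or.inr (by simp [h])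

-- the outer (per-depth) correspondence
theorem pv_outer_loop (N : List String) :
    ∀ (ds : List Int) (keptPrev : List String) (red : PySem.Dict Int (List String)),
    ds.Pairwise (· < ·) →
    (∀ k ∈ keptPrev, k ∈ N) →
    (∀ k ∈ keptPrev, ∀ d ∈ ds, pvCnt k < d) →
    (∀ y ∈ N, pvCnt y ∈ ds ∨ ∃ p ∈ keptPrev, pvCov p y) →
    red = keptPrev.foldl pvDictStep PySem.Dict.empty →
    ds.foldl (fun red d =>
        ((N.filter (fun lab => pvCnt lab == d)).foldl
            (pvInnerStep (PySem.Set.ofList N) d) (PySem.Set.empty, red)).2) red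
      = (ds.foldl (fun kept d =>
            (N.filter (fun lab => pvCnt lab == d)).foldl pvAStep kept) keptPrev).foldl
          pvDictStep PySem.Dict.empty := by
  intro ds
  induction ds with
  | nil =>
    intro keptPrev red _ _ _ _ hred
    simpa using hred
  | cons d rest ih =>
    intro keptPrev red hpw hN hlt hcov hred
    have hpw1 := (List.pairwise_cons.mp hpw).1
    have hpw2 := (List.pairwise_cons.mp hpw).2
    obtain ⟨cur', hA, hB, hcnt', hsub⟩ := pv_inner_loop N d
      (N.filter (fun lab => pvCnt lab == d)) keptPrev [] red
      (fun lab h => by simpa using List.of_mem_filter h)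
      (by simp)
      hN
      (fun k hk => hlt k hk d (by simp))
      (fun y hy hylt => by
        rcases hcov y hy with h | h
        · exfalso
          rcases List.mem_cons.mp h with h1 | h1
          · omega
          · have := hpw1 _ h1; omega
        · exact h)
      (by simpa using hred)
    have hA2 : (N.filter (fun lab => pvCnt lab == d)).foldl pvAStep keptPrev
        = keptPrev ++ cur' := by simpa using hA
    have hB2 : ((N.filter (fun lab => pvCnt lab == d)).foldl
          (pvInnerStep (PySem.Set.ofList N) d) (PySem.Set.empty, red)).2
        = (keptPrev ++ cur').foldl pvDictStep PySem.Dict.empty := by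
      show ((N.filter (fun lab => pvCnt lab == d)).foldl
          (pvInnerStep (PySem.Set.ofList N) d) (([] : List String), red)).2 = _
      rw [hB]
    rw [List.foldl_cons, List.foldl_cons, hB2, hA2]
    have hcur'N : ∀ k ∈ cur', k ∈ N := by
      intro k hk
      rcases hsub k hk with h | h
      · simp at h
      · exact List.mem_of_mem_filter h
    apply ih (keptPrev ++ cur') _ hpw2
    · intro k hk
      rcases List.mem_append.mp hk with h | h
      · exact hN k h
      · exact hcur'N k h
    · intro k hk d' hd'
      rcases List.mem_append.mp hk with h | h
      · exact hlt k h d' (by simp [hd'])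
      · rw [hcnt' k h]
        exact hpw1 d' hd'
    · intro y hy
      rcases hcov y hy with h | h
      · rcases List.mem_cons.mp h with h1 | h1
        · right
          have hybucket : y ∈ N.filter (fun lab => pvCnt lab == d) :=
            List.mem_filter.mpr ⟨hy, by simp [h1]⟩
          have := pv_afold_covers (N.filter (fun lab => pvCnt lab == d)) keptPrev y
            (Or.inl hybucket)
          rw [hA2] at this
          exact this
        · exact Or.inl h1
      · obtain ⟨p, hp, hpc⟩ := h
        exact Or.inr ⟨p, List.mem_append_left _ hp, hpc⟩
    · rfl

-- B's first pass, named: split the pair fold into its two components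
theorem pv_buckets_split (filters : List String) :
    filters.foldl pvBucketStep (PySem.Dict.empty, PySem.Set.empty)
      = (filters.foldl (fun d f => d.modify (pvCnt (pvNorm f)) [] (fun l => l ++ [pvNorm f]))
            PySem.Dict.empty,
         filters.foldl (fun s f => PySem.Set.add s (pvNorm f)) PySem.Set.empty) := by
  rw [show pvBucketStep = (fun (st : PySem.Dict Int (List String) × PySem.Set String) f =>
      ((fun (d : PySem.Dict Int (List String)) f => d.modify (pvCnt (pvNorm f)) []
          (fun l => l ++ [pvNorm f])) st.1 f,
       (fun (s : PySem.Set String) f => PySem.Set.add s (pvNorm f)) st.2 f)) from rfl]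
  exact PySem.List.foldl_prod_mk
    (fun (d : PySem.Dict Int (List String)) f => d.modify (pvCnt (pvNorm f)) []
      (fun l => l ++ [pvNorm f]))
    (fun (s : PySem.Set String) f => PySem.Set.add s (pvNorm f))
    filters PySem.Dict.empty PySem.Set.empty

theorem pv_buckets_getD (filters : List String) (d : Int) :
    (filters.foldl pvBucketStep (PySem.Dict.empty, PySem.Set.empty)).1.getD d []
      = (filters.map pvNorm).filter (fun lab => pvCnt lab == d) := by
  rw [pv_buckets_split]
  have h1 : filters.foldl (fun d f => d.modify (pvCnt (pvNorm f)) [] (fun l => l ++ [pvNorm f]))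
        PySem.Dict.empty
      = (filters.map (fun f => (pvCnt (pvNorm f), pvNorm f))).foldl
          (fun d p => d.modify p.1 [] (fun l => l ++ [p.2])) PySem.Dict.empty := by
    rw [List.foldl_map]
  rw [h1, PySem.Dict.getD_foldl_modify_append, PySem.Dict.getD_empty]
  rw [List.filter_map, List.filter_map, List.map_map]
  rfl

theorem pv_buckets_keys (filters : List String) :
    (filters.foldl pvBucketStep (PySem.Dict.empty, PySem.Set.empty)).1.keys
      = PySem.Set.ofList ((filters.map pvNorm).map pvCnt) := by
  rw [pv_buckets_split]
  rw [PySem.Dict.keys_foldl_modify_key filters (fun f => pvCnt (pvNorm f)) []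
    (fun _ f => fun l => l ++ [pvNorm f]) PySem.Dict.empty]
  rw [PySem.Dict.keys_empty]
  rw [PySem.Set.update_nil_left, List.map_map]
  rfl

theorem pv_universe (filters : List String) :
    (filters.foldl pvBucketStep (PySem.Dict.empty, PySem.Set.empty)).2
      = PySem.Set.ofList (filters.map pvNorm) := by
  rw [pv_buckets_split]
  show filters.foldl (fun s f => PySem.Set.add s (pvNorm f)) PySem.Set.empty = _
  rw [← PySem.Set.update_map_eq_foldl_add]
  exact PySem.Set.update_nil_left _

-- ===== VERDICT (by name: the statement is the Claim_ definition above) =====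
theorem get_minimal_filter_list_py_spec : Claim_equal_get_minimal_filter_list_py := by
  intro filters _
  unfold Spec_get_minimal_filter_list_py
  simp only [get_minimal_filter_list_py, get_minimal_filter_list_py_alt]
  rw [pv_universe, pv_buckets_keys]
  have hfun : (fun (red : PySem.Dict Int (List String)) depth =>
        (((filters.foldl pvBucketStep (PySem.Dict.empty, PySem.Set.empty)).1.getD depth []).foldl
          (pvInnerStep (PySem.Set.ofList (filters.map pvNorm)) depth) (PySem.Set.empty, red)).2)
      = (fun red depth =>
        (((filters.map pvNorm).filter (fun lab => pvCnt lab == depth)).foldl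
          (pvInnerStep (PySem.Set.ofList (filters.map pvNorm)) depth) (PySem.Set.empty, red)).2) := by
    funext red depth
    rw [pv_buckets_getD]
  rw [hfun]
  rw [pv_outer_loop (filters.map pvNorm)
    (PySem.List.sorted (PySem.Set.ofList ((filters.map pvNorm).map pvCnt)) (fun x => x) false)
    [] PySem.Dict.empty
    (PySem.List.sorted_ofList_pairwise_lt _)
    (by simp) (by simp)
    (fun y hy => Or.inl (by
      rw [PySem.List.mem_sorted, PySem.Set.mem_ofList]
      exact List.mem_map_of_mem hy))
    rfl]
  congr 2
  rw [pv_stable_sort_buckets pvCnt (filters.map pvNorm).length (filters.map pvNorm) (le_refl _)]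
  rw [List.flatMap_def, List.foldl_flatten, List.foldl_map]
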